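-- pv_equiv track=rewrite | github.com/brycepanza/handson | conversion.py | mantissa
-- ===== SOURCE A (Python) =====
-- def atoi(char):
--     unicode = ord(char)
--     if unicode not in range(ord('0'), ord('9')+1):
--         # pass error for not number
--         return None
--     # send number as integer
--     return unicode - ord('0')
--
-- def mantissa(num_string):
--     """
--     Extracts the mantissa (fractional part) from a number string.
--
--     Returns:
--         tuple: (bool, int, int) - (True, numerator, denominator) if valid, (False, 0, 0) if invalid
--     """
--
--     # decimal numerator over power of ten
--     numerator = 0
--     # decimal denominator power of ten
--     denominator = 1
--
--     # function to send failed status to caller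
--     def exit_with_fail():
--         return (False, 0, 0)
--
--     # check for negative value
--     if num_string[0] == '-':
--         # local assign absolute value
--         num_string = num_string[1:]
--
--     decimal_index = None
--     # iterate to pass integer section
--     for i in range(len(num_string)):
--         # check for end of integer
--         if num_string[i] == '.':
--             decimal_index = i
--             break
--         # otherwise check for invalid input
--         if atoi(num_string[i]) == None:
--             return exit_with_fail()
--
--     # check for failed exit
--     if decimal_index == None:
--         return exit_with_fail()
--
--     # iterate to find fraction
--     for i in range(decimal_index + 1, len(num_string)):
--         digit = atoi(num_string[i])
--         # check for invalid input
--         if digit == None: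
--             return exit_with_fail()
--         # update state
--         numerator = 10 * numerator + digit
--         denominator = 10 * denominator
--
--     return (True, numerator, denominator)
-- ===== SOURCE B (Python) =====
-- def mantissa(num_string):
--     """
--     Extracts the mantissa (fractional part) from a number string.
--
--     Returns:
--         tuple: (bool, int, int) - (True, numerator, denominator) if valid, (False, 0, 0) if invalid
--     """
--     # strip at most one leading '-' (bare index: empty input raises, as in A)
--     if num_string[0] == '-':
--         num_string = num_string[1:]
--     int_part, dot, frac = num_string.partition('.')
--     if not dot:
--         return (False, 0, 0)
--     digits = '0123456789'
--     if any(c not in digits for c in int_part) or any(c not in digits for c in frac):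
--         return (False, 0, 0)
--     numerator = sum((ord(c) - 48) * 10 ** i for i, c in enumerate(reversed(frac)))
--     return (True, numerator, 10 ** len(frac))
-- ===== Notes on version B (the rewrite author's own statement) =====
-- stated objective: simpler
-- what changed: B replaces A's two sequential char-by-char scans with Horner accumulation by a partition-at-the-first-dot, whole-part validation, and a place-value sum over the reversed fractional digits with 10**len(frac) as denominator.
import Mathlib
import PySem

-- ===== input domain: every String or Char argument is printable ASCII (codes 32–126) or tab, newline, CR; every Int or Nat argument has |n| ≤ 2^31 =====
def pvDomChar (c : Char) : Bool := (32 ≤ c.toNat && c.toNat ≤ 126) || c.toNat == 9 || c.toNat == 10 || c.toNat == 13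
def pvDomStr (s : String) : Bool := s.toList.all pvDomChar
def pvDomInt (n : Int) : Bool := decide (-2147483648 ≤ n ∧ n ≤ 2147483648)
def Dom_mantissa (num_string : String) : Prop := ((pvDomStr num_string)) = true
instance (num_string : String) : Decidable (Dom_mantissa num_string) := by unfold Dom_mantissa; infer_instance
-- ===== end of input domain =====

-- B replaces A's char-by-char scan with Horner accumulation by a partition-at-'.'/validate/
-- place-value-sum decomposition (simpler); equivalence is about the return value only.

-- ===== PORT A =====
def atoiA (c : Char) : Option Int :=
  if 48 ≤ c.toNat ∧ c.toNat ≤ 57 then some ((c.toNat : Int) - 48) else none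

def mantissaFrac : List Char → Int → Int → Bool × Int × Int
  | [], num, den => (true, num, den)
  | c :: rest, num, den =>
    match atoiA c with
    | none => (false, 0, 0)
    | some d => mantissaFrac rest (10 * num + d) (10 * den)

def mantissaInt : List Char → Bool × Int × Int
  | [] => (false, 0, 0)
  | c :: rest =>
    if c = '.' then mantissaFrac rest 0 1
    else if atoiA c = none then (false, 0, 0)
    else mantissaInt rest

def mantissa (num_string : String) : Bool × Int × Int :=
  match num_string.toList with
  | [] => (false, 0, 0)  -- IndexError in Python; excluded by Pre_mantissa
  | c :: rest => mantissaInt (if c = '-' then rest else c :: rest)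

-- ===== PORT B =====
def digitsB : List Char := "0123456789".toList

-- sum((ord(c) - 48) * 10 ** i for i, c in enumerate(reversed(frac)))
def bval (l : List Char) : Int :=
  ((l.reverse.zipIdx).map (fun p => ((p.1.toNat : Int) - 48) * 10 ^ p.2)).sum

def altCore (cs : List Char) : Bool × Int × Int :=
  let ip := cs.takeWhile (· ≠ '.')
  match cs.dropWhile (· ≠ '.') with
  | [] => (false, 0, 0)                       -- no dot
  | _ :: fp =>
    if ip.any (fun ch => !(digitsB.contains ch)) || fp.any (fun ch => !(digitsB.contains ch))
    then (false, 0, 0)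
    else (true, bval fp, (10 : Int) ^ fp.length)

def mantissa_alt (num_string : String) : Bool × Int × Int :=
  match num_string.toList with
  | [] => (false, 0, 0)  -- IndexError in Python; excluded by Pre_mantissa
  | c :: rest => altCore (if c = '-' then rest else c :: rest)

-- ===== PRECONDITION & SPEC =====
-- Pre_ excludes only the empty string, on which Python A raises IndexError (num_string[0]).
def Pre_mantissa (num_string : String) : Prop := num_string ≠ ""
instance (num_string : String) : Decidable (Pre_mantissa num_string) := by unfold Pre_mantissa; infer_instance
def pvWitness_mantissa : String := "12.5"

def Spec_mantissa (num_string : String) (out : Bool × Int × Int) : Prop := out = mantissa_alt num_string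
instance (num_string : String) (out : Bool × Int × Int) : Decidable (Spec_mantissa num_string out) := by unfold Spec_mantissa; infer_instance

-- ===== CLAIM (what is proved, stated in full; the proofs are below) =====
def Claim_equal_mantissa : Prop := ∀ (num_string : String), Dom_mantissa num_string → Pre_mantissa num_string → Spec_mantissa num_string (mantissa num_string)

-- ===== LEMMAS AND PROOFS =====

theorem digitsB_eq : digitsB = ['0','1','2','3','4','5','6','7','8','9'] := by decide

theorem digit_mem (c : Char) : digitsB.contains c = true ↔ (48 ≤ c.toNat ∧ c.toNat ≤ 57) := by
  rw [digitsB_eq]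
  constructor
  · intro h
    simp only [List.contains_cons, List.contains_nil, Bool.or_eq_true, beq_iff_eq] at h
    rcases h with h|h|h|h|h|h|h|h|h|h|h <;>
      first | (subst h; exact ⟨by decide, by decide⟩) | exact absurd h (by decide)
  · intro ⟨h1, h2⟩
    have hc : c = Char.ofNat c.toNat := (Char.ofNat_toNat c).symm
    interval_cases h : c.toNat <;> rw [hc] <;> decide

theorem bval_cons (c : Char) (l : List Char) :
    bval (c :: l) = ((c.toNat : Int) - 48) * 10 ^ l.length + bval l := by
  simp [bval, List.reverse_cons, List.zipIdx_append]
  ring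

theorem fracA_eq (l : List Char) (num den : Int) :
    mantissaFrac l num den =
      if l.all (fun ch => digitsB.contains ch)
      then (true, num * 10 ^ l.length + bval l, den * 10 ^ l.length)
      else (false, 0, 0) := by
  induction l generalizing num den with
  | nil => simp [mantissaFrac, bval]
  | cons c rest ih =>
    by_cases hd : digitsB.contains c = true
    · have hb := (digit_mem c).mp hd
      have hmem : c ∈ digitsB := by simpa using hd
      have ha : atoiA c = some ((c.toNat : Int) - 48) := by simp [atoiA, hb.1, hb.2]
      simp only [mantissaFrac, ha, ih, List.all_cons, hd, Bool.true_and, bval_cons,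
        List.length_cons]
      split_ifs with hall <;> simp
      constructor <;> ring
    · have hmem : c ∉ digitsB := by simpa using hd
      have ha : atoiA c = none := by
        simp only [atoiA, ite_eq_right_iff]
        intro hb; exact absurd ((digit_mem c).mpr hb) hd
      simp [mantissaFrac, ha, List.all_cons, hmem]

theorem any_not_contains (l : List Char) :
    (l.any fun ch => !digitsB.contains ch) = !l.all (fun ch => digitsB.contains ch) := by
  rw [List.all_eq_not_any_not, Bool.not_not]

theorem core_eq (cs : List Char) : mantissaInt cs = altCore cs := by
  induction cs with
  | nil => simp [mantissaInt, altCore]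
  | cons c rest ih =>
    by_cases hdot : c = '.'
    · subst hdot
      have htw : ('.' :: rest).takeWhile (· ≠ '.') = [] := by simp [List.takeWhile]
      have hdw : ('.' :: rest).dropWhile (· ≠ '.') = '.' :: rest := by simp [List.dropWhile]
      simp only [mantissaInt, altCore, htw, hdw, fracA_eq, List.any_nil, Bool.false_or,
        any_not_contains]
      cases hall : rest.all (fun ch => digitsB.contains ch) <;> simp
    · have htw : (c :: rest).takeWhile (· ≠ '.') = c :: rest.takeWhile (· ≠ '.') := by
        simp [List.takeWhile, hdot]
      have hdw : (c :: rest).dropWhile (· ≠ '.') = rest.dropWhile (· ≠ '.') := by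
        simp [List.dropWhile, hdot]
      by_cases hd : digitsB.contains c = true
      · have hb := (digit_mem c).mp hd
        have hmem : c ∈ digitsB := by simpa using hd
        have ha : ¬ (atoiA c = none) := by simp [atoiA, hb.1, hb.2]
        simp only [mantissaInt, if_neg hdot, if_neg ha, ih, altCore, htw, hdw]
        cases rest.dropWhile (· ≠ '.') with
        | nil => rfl
        | cons x fp => simp [hmem]
      · have hmem : c ∉ digitsB := by simpa using hd
        have ha : atoiA c = none := by
          simp only [atoiA, ite_eq_right_iff]
          intro hb; exact absurd ((digit_mem c).mpr hb) hd
        simp only [mantissaInt, if_neg hdot, ha, altCore, htw, hdw]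
        cases rest.dropWhile (· ≠ '.') with
        | nil => rfl
        | cons x fp => simp [hmem]

-- ===== VERDICT (by name: the statement is the Claim_ definition above) =====
theorem mantissa_spec : Claim_equal_mantissa := by
  intro s _ _
  unfold Spec_mantissa mantissa mantissa_alt
  cases s.toList with
  | nil => rfl
  | cons c rest => exact core_eq _
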